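-- pv_equiv track=rewrite | github.com/15hours/grind | graph/1306.py | _bfs_approach
-- ===== SOURCE A (Python) =====
-- import collections
--
-- def _bfs_approach(
--                   arr: list[int],
--                   start: int
--                   ) -> bool:
--
--     arr_len = len(arr)
--     visited = [False for _ in range(arr_len)]
--     queue = collections.deque()
--
--     visited[start] = True
--     queue.append(start)
--     target = 0
--
--     while queue:
--         i = queue.popleft()
--         if arr[i] == target:
--             return True
--
--         for i in [i - arr[i], i + arr[i]]:
--             if 0 <= i < arr_len and not visited[i]:
--                 visited[i] = True
--                 queue.append(i)
--
--     return False
-- ===== SOURCE B (Python) =====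
-- def _bfs_approach(arr, start):
--     n = len(arr)
--     reach = [False] * n
--     reach[start] = True
--     changed = True
--     while changed:
--         changed = False
--         for i in range(n):
--             if reach[i]:
--                 for j in (i - arr[i], i + arr[i]):
--                     if 0 <= j < n and not reach[j]:
--                         reach[j] = True
--                         changed = True
--     return any(reach[i] and arr[i] == 0 for i in range(n))
-- ===== Notes on version B (the rewrite author's own statement) =====
-- stated objective: alternative
-- what changed: Replaces the deque-based BFS (pop from a frontier queue, test the popped cell, enqueue unseen neighbours) with a round-based boolean fixpoint saturation: a reach[] bit-array is repeatedly swept over all indices, marking jump targets of already-reached cells until a sweep changes nothing, and the answer is a final scan for a reached zero cell.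
-- outside the precondition, e.g. on _bfs_approach([0, 5, 1], -1): A returns True, B returns False
import Mathlib
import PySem

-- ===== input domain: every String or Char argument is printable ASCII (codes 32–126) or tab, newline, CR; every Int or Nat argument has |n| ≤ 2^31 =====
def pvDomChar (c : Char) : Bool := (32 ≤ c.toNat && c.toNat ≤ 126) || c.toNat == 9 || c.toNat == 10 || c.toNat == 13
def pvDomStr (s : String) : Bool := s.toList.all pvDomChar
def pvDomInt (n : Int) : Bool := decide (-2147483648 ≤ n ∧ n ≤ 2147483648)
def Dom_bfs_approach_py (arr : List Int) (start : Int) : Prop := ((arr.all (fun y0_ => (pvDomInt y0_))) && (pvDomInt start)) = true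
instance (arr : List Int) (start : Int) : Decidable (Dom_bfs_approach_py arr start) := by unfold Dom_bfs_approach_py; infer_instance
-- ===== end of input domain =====

-- B replaces the deque BFS by a round-based boolean fixpoint saturation over the whole array (alternative algorithm, no speed claim).


-- ===== PORT A =====
-- one iteration of A's inner `for i in [i - arr[i], i + arr[i]]` body on the (visited, queue) state
def pushA (arr : List Int) (vq : List Bool × List Int) (c : Int) : List Bool × List Int :=
  if 0 ≤ c ∧ c < (arr.length : Int) ∧ PySem.List.pyGetD vq.1 c false = false
  then (PySem.List.pySetD vq.1 c true, vq.2 ++ [c]) else vq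

-- the `while queue` loop; the fuel only makes the recursion structural (arr.length + 1 provably
-- suffices: each enqueue marks a fresh visited cell, so there are at most arr.length dequeues)
def bfsLoop (arr : List Int) (fuel : Nat) (visited : List Bool) (queue : List Int) : Bool :=
  match fuel, queue with
  | _, [] => false
  | 0, _ :: _ => false
  | fuel + 1, i :: queue =>
    let a := PySem.List.pyGetD arr i 0
    if a == 0 then true
    else
      let vq := List.foldl (pushA arr) (visited, queue) [i - a, i + a]
      bfsLoop arr fuel vq.1 vq.2

def bfs_approach_py (arr : List Int) (start : Int) : Bool :=
  let visited := List.replicate arr.length false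
  let visited := PySem.List.pySetD visited start true
  bfsLoop arr (arr.length + 1) visited [start]

-- ===== PORT B =====
-- one iteration of B's inner `for j in (i - arr[i], i + arr[i])` body on the (reach, changed) state
def updB (arr : List Int) (st : List Bool × Bool) (j : Int) : List Bool × Bool :=
  if 0 ≤ j ∧ j < (arr.length : Int) ∧ PySem.List.pyGetD st.1 j false = false
  then (PySem.List.pySetD st.1 j true, true) else st

-- the body of B's `for i in range(n)` sweep
def sweepB (arr : List Int) (st : List Bool × Bool) (i : Int) : List Bool × Bool :=
  if PySem.List.pyGetD st.1 i false = true
  then List.foldl (updB arr) st [i - PySem.List.pyGetD arr i 0, i + PySem.List.pyGetD arr i 0]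
  else st

-- one full `for i in range(n)` sweep of B
def passB (arr : List Int) (st : List Bool × Bool) : List Bool × Bool :=
  (PySem.List.pyRange 0 (arr.length : Int) 1).foldl (sweepB arr) st

-- the `while changed` loop; the fuel only makes the recursion structural (arr.length + 1 provably
-- suffices: every changing sweep turns at least one reach cell from False to True)
def satLoop (arr : List Int) (fuel : Nat) (reach : List Bool) : List Bool :=
  match fuel with
  | 0 => reach
  | fuel + 1 =>
    let st := passB arr (reach, false)
    if st.2 then satLoop arr fuel st.1 else st.1

def bfs_approach_py_alt (arr : List Int) (start : Int) : Bool :=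
  let reach := List.replicate arr.length false
  let reach := PySem.List.pySetD reach start true
  let r := satLoop arr (arr.length + 1) reach
  (PySem.List.pyRange 0 (arr.length : Int) 1).any
    (fun i => PySem.List.pyGetD r i false && (PySem.List.pyGetD arr i 0 == 0))

-- ===== PRECONDITION & SPEC =====
-- Pre_ restricts to the problem's natural domain 0 ≤ start < len(arr): outside [-len, len) both
-- programs raise IndexError, and for -len ≤ start < 0 A returns a value only through Python's
-- negative-index wraparound (an accident of indexing, not part of the task), where B saturates
-- from the wrapped cell instead.
def Pre_bfs_approach_py (arr : List Int) (start : Int) : Prop :=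
  0 ≤ start ∧ start < (arr.length : Int)
instance (arr : List Int) (start : Int) : Decidable (Pre_bfs_approach_py arr start) := by
  unfold Pre_bfs_approach_py; infer_instance

def pvWitness_bfs_approach_py : List Int × Int := ([2, 0, 3], 0)

def Spec_bfs_approach_py (arr : List Int) (start : Int) (out : Bool) : Prop :=
  out = bfs_approach_py_alt arr start
instance (arr : List Int) (start : Int) (out : Bool) : Decidable (Spec_bfs_approach_py arr start out) := by
  unfold Spec_bfs_approach_py; infer_instance

-- ===== CLAIM (what is proved, stated in full; the proofs are below) =====
def Claim_equal_bfs_approach_py : Prop :=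
  ∀ (arr : List Int) (start : Int), Dom_bfs_approach_py arr start →
    Pre_bfs_approach_py arr start →
      Spec_bfs_approach_py arr start (bfs_approach_py arr start)

-- ===== LEMMAS AND PROOFS =====

-- general list facts used on both sides
theorem getD_set_bool (v : List Bool) (k j : Nat) (x : Bool) :
    (v.set k x).getD j false = if j = k ∧ k < v.length then x else v.getD j false := by
  simp only [List.getD_eq_getElem?_getD, List.getElem?_set]
  split_ifs with h1 h2 h3 <;> simp_all

theorem count_false_set (v : List Bool) (k : Nat) (h : k < v.length)
    (h2 : v.getD k false = false) : (v.set k true).count false + 1 = v.count false := by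
  induction v generalizing k with
  | nil => simp at h
  | cons b t ih =>
    cases k with
    | zero => simp_all [List.getD]
    | succ k =>
      simp only [List.set, List.count_cons]
      have := ih k (by simpa using h) (by simpa [List.getD] using h2)
      omega

theorem getD_true_lt (v : List Bool) (k : Nat) (h : v.getD k false = true) : k < v.length := by
  by_contra hk
  rw [List.getD_eq_getElem?_getD, List.getElem?_eq_none (by omega)] at h
  simp at h

theorem pyGetD_toNat {α : Type} (v : List α) (i : Int) (h : 0 ≤ i) (d : α) :
    PySem.List.pyGetD v i d = v.getD i.toNat d := by
  conv_lhs => rw [← Int.toNat_of_nonneg h]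
  rw [PySem.List.pyGetD_natCast]

-- the jump graph: Reach arr s k ↔ index k is reachable from s by jumps i ↦ i ± arr[i]
inductive Reach (arr : List Int) (s : Nat) : Nat → Prop
  | refl : s < arr.length → Reach arr s s
  | step {j k : Nat} : Reach arr s j →
      ((k : Int) = (j : Int) - arr.getD j 0 ∨ (k : Int) = (j : Int) + arr.getD j 0) →
      k < arr.length → Reach arr s k

theorem reach_lt {arr : List Int} {s k : Nat} (h : Reach arr s k) : k < arr.length := by
  cases h with
  | refl h => exact h
  | step _ _ h => exact h

-- ---- side A: BFS loop invariant ----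

def StA (arr : List Int) (s : Nat) (v : List Bool) (q : List Int) : Prop :=
  v.length = arr.length ∧ v.getD s false = true ∧
  (∀ i ∈ q, 0 ≤ i ∧ i < (arr.length : Int) ∧ v.getD i.toNat false = true) ∧
  (∀ k : Nat, v.getD k false = true → Reach arr s k)

def ClosedA (arr : List Int) (v : List Bool) (q : List Int) : Prop :=
  ∀ k : Nat, v.getD k false = true → (↑k : Int) ∉ q →
    arr.getD k 0 ≠ 0 ∧
    ∀ c : Int, (c = (k : Int) - arr.getD k 0 ∨ c = (k : Int) + arr.getD k 0) →
      0 ≤ c → c < (arr.length : Int) → v.getD c.toNat false = true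

theorem pushA_spec (arr : List Int) (v : List Bool) (q : List Int) (c : Int)
    (hv : v.length = arr.length) :
    (pushA arr (v, q) c).1.length = arr.length ∧
    (pushA arr (v, q) c).1.count false + (pushA arr (v, q) c).2.length
      = v.count false + q.length ∧
    (∀ i ∈ q, i ∈ (pushA arr (v, q) c).2) ∧
    (∀ i ∈ (pushA arr (v, q) c).2, i ∈ q ∨ (i = c ∧ 0 ≤ c ∧ c < (arr.length : Int))) ∧
    (∀ k : Nat, v.getD k false = true → (pushA arr (v, q) c).1.getD k false = true) ∧
    (∀ k : Nat, (pushA arr (v, q) c).1.getD k false = true →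
       v.getD k false = true ∨ ((k : Int) = c ∧ c ∈ (pushA arr (v, q) c).2)) ∧

    (0 ≤ c → c < (arr.length : Int) → (pushA arr (v, q) c).1.getD c.toNat false = true) := by
  by_cases hcond : 0 ≤ c ∧ c < (arr.length : Int) ∧ PySem.List.pyGetD v c false = false
  · obtain ⟨hc0, hc1, hc2⟩ := hcond
    have hset : pushA arr (v, q) c = (v.set c.toNat true, q ++ [c]) := by
      simp only [pushA, if_pos (⟨hc0, hc1, hc2⟩ :
        0 ≤ c ∧ c < (arr.length : Int) ∧ PySem.List.pyGetD v c false = false)]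
      rw [PySem.List.pySetD_of_nonneg v true hc0]
      
    have hlt : c.toNat < v.length := by omega
    have hfalse : v.getD c.toNat false = false := by rwa [pyGetD_toNat v c hc0] at hc2
    have hcnt := count_false_set v c.toNat hlt hfalse
    rw [hset]
    refine ⟨by simpa using hv, by simp; omega, by intro i hi; exact List.mem_append_left _ hi,
      ?_, ?_, ?_, ?_⟩
    · intro i hi; rcases List.mem_append.mp hi with h | h
      · exact Or.inl h
      · simp at h; exact Or.inr ⟨h, hc0, hc1⟩
    · intro k hk; rw [getD_set_bool]; split_ifs <;> simp_all
    · intro k hk; rw [getD_set_bool] at hk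
      by_cases hkc : k = c.toNat ∧ c.toNat < v.length
      · exact Or.inr ⟨by rw [hkc.1]; exact (Int.toNat_of_nonneg hc0).symm ▸ rfl, by simp⟩
      · rw [if_neg hkc] at hk; exact Or.inl hk
    · intro _ _; rw [getD_set_bool, if_pos ⟨rfl, hlt⟩]
  · have hset : pushA arr (v, q) c = (v, q) := by simp only [pushA, if_neg hcond]
    rw [hset]
    refine ⟨hv, rfl, fun i hi => hi, fun i hi => Or.inl hi, fun k hk => hk,
      fun k hk => Or.inl hk, ?_⟩
    intro h0 h1
    have : PySem.List.pyGetD v c false ≠ false := fun h => hcond ⟨h0, h1, h⟩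
    rw [pyGetD_toNat v c h0] at this
    simpa using this


theorem closed_no_zero (arr : List Int) (s : Nat) (v : List Bool)
    (hst : StA arr s v []) (hcl : ClosedA arr v []) :
    ¬ ∃ k, Reach arr s k ∧ arr.getD k 0 = 0 := by
  rintro ⟨k, hr, hz⟩
  have hvk : ∀ m : Nat, Reach arr s m → v.getD m false = true := by
    intro m hm
    induction hm with
    | refl h => exact hst.2.1
    | step hr heq hlt ih =>
      have hclose := (hcl _ ih List.not_mem_nil).2
      have := hclose _ heq (Int.natCast_nonneg _) (by exact_mod_cast hlt)
      simpa using this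
  exact (hcl k (hvk k hr) List.not_mem_nil).1 hz

theorem bfsLoop_iff (arr : List Int) (s : Nat) :
    ∀ (fuel : Nat) (v : List Bool) (q : List Int),
      StA arr s v q → ClosedA arr v q → v.count false + q.length ≤ fuel →
      (bfsLoop arr fuel v q = true ↔ ∃ k, Reach arr s k ∧ arr.getD k 0 = 0) := by
  intro fuel
  induction fuel with
  | zero =>
    intro v q hst hcl hm
    cases q with
    | nil =>
      simp only [bfsLoop, Bool.false_eq_true, false_iff]
      exact closed_no_zero arr s v hst hcl
    | cons _ _ => simp at hm
  | succ fuel ih =>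
    intro v q hst hcl hm
    cases q with
    | nil =>
      simp only [bfsLoop, Bool.false_eq_true, false_iff]
      exact closed_no_zero arr s v hst hcl
    | cons i q =>
      obtain ⟨hlen, hgs, hq, hsound⟩ := hst
      obtain ⟨hi0, hi1, hiv⟩ := hq i (List.mem_cons_self ..)
      have hg : PySem.List.pyGetD arr i 0 = arr.getD i.toNat 0 := pyGetD_toNat arr i hi0 0
      have hri : Reach arr s i.toNat := hsound _ hiv
      have hii : ((i.toNat : Nat) : Int) = i := Int.toNat_of_nonneg hi0
      by_cases hz : arr.getD i.toNat 0 = 0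
      · have : bfsLoop arr (fuel + 1) v (i :: q) = true := by
          simp [bfsLoop, hg]
          exact Or.inl (by rw [← List.getD_eq_getElem?_getD]; exact hz)
        rw [this]
        simp only [true_iff]
        exact ⟨i.toNat, hri, hz⟩
      · have hloop : bfsLoop arr (fuel + 1) v (i :: q) =
            bfsLoop arr fuel
              (pushA arr (pushA arr (v, q) (i - PySem.List.pyGetD arr i 0))
                (i + PySem.List.pyGetD arr i 0)).1
              (pushA arr (pushA arr (v, q) (i - PySem.List.pyGetD arr i 0))
                (i + PySem.List.pyGetD arr i 0)).2 := by
          simp only [bfsLoop, List.foldl]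
          rw [if_neg (by simpa [hg] using hz)]
        rw [hloop]
        set c1 : Int := i - PySem.List.pyGetD arr i 0 with hc1
        set c2 : Int := i + PySem.List.pyGetD arr i 0 with hc2
        obtain ⟨s1len, s1cnt, s1sub, s1cls, s1mono, s1new, s1hit⟩ :=
          pushA_spec arr v q c1 hlen
        set st1 := pushA arr (v, q) c1 with hst1
        obtain ⟨s2len, s2cnt, s2sub, s2cls, s2mono, s2new, s2hit⟩ :=
          pushA_spec arr st1.1 st1.2 c2 s1len
        have hpair : pushA arr st1 c2 = pushA arr (st1.1, st1.2) c2 := rfl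
        rw [hpair]
        set st2 := pushA arr (st1.1, st1.2) c2 with hst2
        -- any in-range candidate is reachable
        have hreach_c : ∀ c : Int, (c = c1 ∨ c = c2) → 0 ≤ c → c < (arr.length : Int) →
            Reach arr s c.toNat := by
          intro c hc h0 h1
          refine Reach.step hri ?_ (by omega)
          rcases hc with rfl | rfl
          · left; rw [Int.toNat_of_nonneg h0, hc1, hg, hii]
          · right; rw [Int.toNat_of_nonneg h0, hc2, hg, hii]
        -- bounds for any member of the new queue
        have hmem2 : ∀ i' ∈ st2.2, i' ∈ q ∨ ((i' = c1 ∨ i' = c2) ∧ 0 ≤ i' ∧ i' < (arr.length : Int)) := by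
          intro i' hi'
          rcases s2cls i' hi' with h | ⟨rfl, hb⟩
          · rcases s1cls i' h with h' | ⟨rfl, hb⟩
            · exact Or.inl h'
            · exact Or.inr ⟨Or.inl rfl, hb⟩
          · exact Or.inr ⟨Or.inr rfl, hb⟩
        have hStA : StA arr s st2.1 st2.2 := by
          refine ⟨s2len, s2mono _ (s1mono _ hgs), ?_, ?_⟩
          · intro i' hi'
            rcases hmem2 i' hi' with h | ⟨hc, h0, h1⟩
            · obtain ⟨h0, h1, hv'⟩ := hq i' (List.mem_cons_of_mem _ h)
              exact ⟨h0, h1, s2mono _ (s1mono _ hv')⟩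
            · refine ⟨h0, h1, ?_⟩
              rcases hc with rfl | rfl
              · exact s2mono _ (s1hit h0 h1)
              · exact s2hit h0 h1
          · intro k hk
            rcases s2new k hk with hk1 | ⟨hkc, hcin⟩
            · rcases s1new k hk1 with hk0 | ⟨hkc, hcin⟩
              · exact hsound k hk0
              · -- ↑k = c1, c1 ∈ st1.2 : get its bounds
                have hb : 0 ≤ c1 ∧ c1 < (arr.length : Int) := by
                  rcases s1cls c1 hcin with h | ⟨_, hb⟩
                  · exact ⟨(hq c1 (List.mem_cons_of_mem _ h)).1, (hq c1 (List.mem_cons_of_mem _ h)).2.1⟩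
                  · exact hb
                have := hreach_c c1 (Or.inl rfl) hb.1 hb.2
                rwa [← hkc, Int.toNat_natCast] at this
            · have hb : 0 ≤ c2 ∧ c2 < (arr.length : Int) := by
                rcases hmem2 c2 hcin with h | ⟨_, hb⟩
                · exact ⟨(hq c2 (List.mem_cons_of_mem _ h)).1, (hq c2 (List.mem_cons_of_mem _ h)).2.1⟩
                · exact hb
              have := hreach_c c2 (Or.inr rfl) hb.1 hb.2
              rwa [← hkc, Int.toNat_natCast] at this
        have hClosed : ClosedA arr st2.1 st2.2 := by
          intro k hk hknotin
          rcases s2new k hk with hk1 | ⟨hkc, hcin⟩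
          swap
          · exact absurd (hkc ▸ hcin) hknotin
          rcases s1new k hk1 with hk0 | ⟨hkc, hcin⟩
          swap
          · exact absurd (hkc ▸ s2sub _ hcin) hknotin
          have hknq : (↑k : Int) ∉ q := fun h => hknotin (s2sub _ (s1sub _ h))
          by_cases hki : (↑k : Int) = i
          · -- k is the freshly processed node
            have hkt : k = i.toNat := by omega
            subst hkt
            refine ⟨hki ▸ hz, ?_⟩
            intro c hc h0 h1
            have hc' : c = c1 ∨ c = c2 := by
              rcases hc with h | h
              · left; rw [hc1, hg, ← hki]; exact h
              · right; rw [hc2, hg, ← hki]; exact h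
            rcases hc' with rfl | rfl
            · exact s2mono _ (s1hit h0 h1)
            · exact s2hit h0 h1
          · have := hcl k hk0 (by
              intro h
              rcases List.mem_cons.mp h with h | h
              · exact hki h
              · exact hknq h)
            exact ⟨this.1, fun c hc h0 h1 => s2mono _ (s1mono _ (this.2 c hc h0 h1))⟩
        have hmeas : st2.1.count false + st2.2.length ≤ fuel := by
          simp only [List.length_cons] at hm
          omega
        exact ih st2.1 st2.2 hStA hClosed hmeas

-- ---- side B: saturation invariant ----

def StB (arr : List Int) (s : Nat) (r : List Bool) : Prop :=
  r.length = arr.length ∧ r.getD s false = true ∧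
  (∀ k : Nat, r.getD k false = true → Reach arr s k)

def ClosedB (arr : List Int) (r : List Bool) : Prop :=
  ∀ k : Nat, r.getD k false = true →
    ∀ c : Int, (c = (k : Int) - arr.getD k 0 ∨ c = (k : Int) + arr.getD k 0) →
      0 ≤ c → c < (arr.length : Int) → r.getD c.toNat false = true

theorem updB_spec (arr : List Int) (r : List Bool) (ch : Bool) (j : Int)
    (hv : r.length = arr.length) :
    (updB arr (r, ch) j).1.length = arr.length ∧
    (∀ k : Nat, r.getD k false = true → (updB arr (r, ch) j).1.getD k false = true) ∧
    (∀ k : Nat, (updB arr (r, ch) j).1.getD k false = true →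
       r.getD k false = true ∨ (k : Int) = j) ∧
    (updB arr (r, ch) j).1.count false ≤ r.count false ∧
    ((updB arr (r, ch) j).2 = true → ch = true ∨ (updB arr (r, ch) j).1.count false < r.count false) ∧
    (ch = true → (updB arr (r, ch) j).2 = true) ∧

    (0 ≤ j → j < (arr.length : Int) → (updB arr (r, ch) j).1.getD j.toNat false = true) := by
  by_cases hcond : 0 ≤ j ∧ j < (arr.length : Int) ∧ PySem.List.pyGetD r j false = false
  · obtain ⟨hc0, hc1, hc2⟩ := hcond
    have hset : updB arr (r, ch) j = (r.set j.toNat true, true) := by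
      simp only [updB, if_pos (⟨hc0, hc1, hc2⟩ :
        0 ≤ j ∧ j < (arr.length : Int) ∧ PySem.List.pyGetD r j false = false)]
      rw [PySem.List.pySetD_of_nonneg r true hc0]
      
    have hlt : j.toNat < r.length := by omega
    have hfalse : r.getD j.toNat false = false := by rwa [pyGetD_toNat r j hc0] at hc2
    have hcnt := count_false_set r j.toNat hlt hfalse
    rw [hset]
    refine ⟨by simpa using hv, ?_, ?_,
      by show List.count false (r.set j.toNat true) ≤ List.count false r; omega,
      fun _ => Or.inr (by show List.count false (r.set j.toNat true) < List.count false r; omega),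
      fun _ => rfl, ?_⟩
    · intro k hk; rw [getD_set_bool]; split_ifs <;> simp_all
    · intro k hk; rw [getD_set_bool] at hk
      by_cases hkc : k = j.toNat ∧ j.toNat < r.length
      · exact Or.inr (by rw [hkc.1]; exact (Int.toNat_of_nonneg hc0).symm ▸ rfl)
      · rw [if_neg hkc] at hk; exact Or.inl hk
    · intro _ _; rw [getD_set_bool, if_pos ⟨rfl, hlt⟩]
  · have hset : updB arr (r, ch) j = (r, ch) := by simp only [updB, if_neg hcond]
    rw [hset]
    refine ⟨hv, fun k hk => hk, fun k hk => Or.inl hk, le_refl _,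
      fun h => Or.inl h, fun h => h, ?_⟩
    intro h0 h1
    have : PySem.List.pyGetD r j false ≠ false := fun h => hcond ⟨h0, h1, h⟩
    rw [pyGetD_toNat r j h0] at this
    simpa using this


theorem updB_snd_mono (arr : List Int) (st : List Bool × Bool) (j : Int) (h : st.2 = true) :
    (updB arr st j).2 = true := by
  unfold updB; split_ifs <;> simp_all

theorem sweepB_step_spec (arr : List Int) (s : Nat) (st : List Bool × Bool) (i : Int)
    (h0 : 0 ≤ i) (hlen : st.1.length = arr.length)
    (hsound : ∀ k : Nat, st.1.getD k false = true → Reach arr s k) :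
    (sweepB arr st i).1.length = arr.length ∧
    (∀ k : Nat, st.1.getD k false = true → (sweepB arr st i).1.getD k false = true) ∧
    (∀ k : Nat, (sweepB arr st i).1.getD k false = true → Reach arr s k) ∧
    (sweepB arr st i).1.count false ≤ st.1.count false ∧
    ((sweepB arr st i).2 = true → st.2 = true ∨ (sweepB arr st i).1.count false < st.1.count false) := by
  by_cases hg : PySem.List.pyGetD st.1 i false = true
  · have hsw : sweepB arr st i =
        updB arr (updB arr st (i - PySem.List.pyGetD arr i 0)) (i + PySem.List.pyGetD arr i 0) := by
      simp [sweepB, hg, List.foldl]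
    rw [hsw]
    set c1 : Int := i - PySem.List.pyGetD arr i 0 with hc1
    set c2 : Int := i + PySem.List.pyGetD arr i 0 with hc2
    obtain ⟨s1len, s1mono, s1new, s1le, s1chg, s1chmono, s1hit⟩ := updB_spec arr st.1 st.2 c1 hlen
    have e1 : updB arr (st.1, st.2) c1 = updB arr st c1 := rfl
    rw [e1] at s1len s1mono s1new s1le s1chg s1chmono s1hit
    set st1 := updB arr st c1 with hst1
    obtain ⟨s2len, s2mono, s2new, s2le, s2chg, s2chmono, s2hit⟩ :=
      updB_spec arr st1.1 st1.2 c2 s1len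
    have e2 : updB arr (st1.1, st1.2) c2 = updB arr st1 c2 := rfl
    rw [e2] at s2len s2mono s2new s2le s2chg s2chmono s2hit
    have hri : Reach arr s i.toNat := by
      apply hsound
      rwa [← pyGetD_toNat st.1 i h0]
    have hii : ((i.toNat : Nat) : Int) = i := Int.toNat_of_nonneg h0
    have hg' : PySem.List.pyGetD arr i 0 = arr.getD i.toNat 0 := pyGetD_toNat arr i h0 0
    refine ⟨s2len, fun k hk => s2mono _ (s1mono _ hk), ?_, le_trans s2le s1le, ?_⟩
    · intro k hk
      have hklt : k < arr.length := s2len ▸ getD_true_lt _ _ hk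
      rcases s2new k hk with hk1 | hkc
      · rcases s1new k hk1 with hk0 | hkc
        · exact hsound k hk0
        · exact Reach.step hri (Or.inl (by rw [hkc, hc1, hg', hii])) hklt
      · exact Reach.step hri (Or.inr (by rw [hkc, hc2, hg', hii])) hklt
    · intro hch
      rcases s2chg hch with h1 | h1
      · rcases s1chg h1 with h | h
        · exact Or.inl h
        · exact Or.inr (lt_of_le_of_lt s2le h)
      · exact Or.inr (lt_of_lt_of_le h1 s1le)
  · have hsw : sweepB arr st i = st := by simp [sweepB, hg]
    rw [hsw]
    exact ⟨hlen, fun _ hk => hk, hsound, le_refl _, fun h => Or.inl h⟩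

-- facts about a whole sweep, by induction over the index list
theorem sweep_fold_spec (arr : List Int) (s : Nat) :
    ∀ (l : List Int) (st : List Bool × Bool), (∀ i ∈ l, 0 ≤ i) →
      st.1.length = arr.length → (∀ k : Nat, st.1.getD k false = true → Reach arr s k) →
      ((List.foldl (sweepB arr) st l).1.length = arr.length ∧
       (∀ k : Nat, st.1.getD k false = true → (List.foldl (sweepB arr) st l).1.getD k false = true) ∧
       (∀ k : Nat, (List.foldl (sweepB arr) st l).1.getD k false = true → Reach arr s k) ∧
       (List.foldl (sweepB arr) st l).1.count false ≤ st.1.count false ∧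
 
      ((List.foldl (sweepB arr) st l).2 = true →
          st.2 = true ∨ (List.foldl (sweepB arr) st l).1.count false < st.1.count false)) := by
  intro l
  induction l with
  | nil => exact fun st _ hlen hsound => ⟨hlen, fun _ hk => hk, hsound, le_refl _, fun h => Or.inl h⟩
  | cons i l ih =>
    intro st hl hlen hsound
    obtain ⟨h1len, h1mono, h1sound, h1le, h1chg⟩ :=
      sweepB_step_spec arr s st i (hl i (List.mem_cons_self ..)) hlen hsound
    obtain ⟨h2len, h2mono, h2sound, h2le, h2chg⟩ :=
      ih (sweepB arr st i) (fun j hj => hl j (List.mem_cons_of_mem _ hj)) h1len h1sound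
    simp only [List.foldl_cons]
    refine ⟨h2len, fun k hk => h2mono _ (h1mono _ hk), h2sound, le_trans h2le h1le, ?_⟩
    intro hch
    rcases h2chg hch with h | h
    · rcases h1chg h with h' | h'
      · exact Or.inl h'
      · exact Or.inr (lt_of_le_of_lt h2le h')
    · exact Or.inr (lt_of_lt_of_le h h1le)


theorem sweep_fold_snd_mono (arr : List Int) :
    ∀ (l : List Int) (st : List Bool × Bool), st.2 = true →
      (List.foldl (sweepB arr) st l).2 = true := by
  intro l
  induction l with
  | nil => exact fun st h => h
  | cons i l ih =>
    intro st h
    simp only [List.foldl_cons]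
    apply ih
    unfold sweepB
    split_ifs with hg
    · simp only [List.foldl]
      exact updB_snd_mono _ _ _ (updB_snd_mono _ _ _ h)
    · exact h

theorem updB_fix (arr : List Int) (st : List Bool × Bool) (j : Int)
    (h : (updB arr st j).2 = false) :
    updB arr st j = st ∧ st.2 = false ∧
    (0 ≤ j → j < (arr.length : Int) → st.1.getD j.toNat false = true) := by
  by_cases hc : 0 ≤ j ∧ j < (arr.length : Int) ∧ PySem.List.pyGetD st.1 j false = false
  · exfalso
    have : (updB arr st j).2 = true := by simp [updB, hc]
    simp [this] at h
  · have he : updB arr st j = st := by simp [updB, hc]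
    rw [he] at h
    refine ⟨he, h, ?_⟩
    intro h0 h1
    have : PySem.List.pyGetD st.1 j false ≠ false := fun hh => hc ⟨h0, h1, hh⟩
    rw [pyGetD_toNat _ _ h0] at this
    simpa using this

theorem sweepB_fix (arr : List Int) (st : List Bool × Bool) (i : Int)
    (h : (sweepB arr st i).2 = false) :
    sweepB arr st i = st ∧ st.2 = false ∧
    (0 ≤ i → st.1.getD i.toNat false = true →
      ∀ c : Int, (c = i - arr.getD i.toNat 0 ∨ c = i + arr.getD i.toNat 0) →
        0 ≤ c → c < (arr.length : Int) → st.1.getD c.toNat false = true) := by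
  by_cases hg : PySem.List.pyGetD st.1 i false = true
  · have hsw : sweepB arr st i =
        updB arr (updB arr st (i - PySem.List.pyGetD arr i 0)) (i + PySem.List.pyGetD arr i 0) := by
      simp [sweepB, hg, List.foldl]
    rw [hsw] at h ⊢
    obtain ⟨he2, hmid2, hj2⟩ := updB_fix arr _ _ h
    obtain ⟨he1, hst2, hj1⟩ := updB_fix arr _ _ hmid2
    rw [he1] at he2 hj2
    refine ⟨by rw [he1, he2], hst2, ?_⟩
    intro h0 _ c hc hc0 hc1
    have hg' : PySem.List.pyGetD arr i 0 = arr.getD i.toNat 0 := pyGetD_toNat arr i h0 0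
    rw [hg'] at hj1 hj2
    rcases hc with rfl | rfl
    · exact hj1 hc0 hc1
    · exact hj2 hc0 hc1
  · have hsw : sweepB arr st i = st := by simp [sweepB, hg]
    rw [hsw] at h
    refine ⟨hsw, h, ?_⟩
    intro h0 htrue
    exfalso
    exact hg (by rwa [pyGetD_toNat _ _ h0])

theorem sweep_fold_fix (arr : List Int) :
    ∀ (l : List Int) (st : List Bool × Bool),
      (List.foldl (sweepB arr) st l).2 = false →
      List.foldl (sweepB arr) st l = st ∧
      ∀ i ∈ l, 0 ≤ i → st.1.getD i.toNat false = true →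
        ∀ c : Int, (c = i - arr.getD i.toNat 0 ∨ c = i + arr.getD i.toNat 0) →
          0 ≤ c → c < (arr.length : Int) → st.1.getD c.toNat false = true := by
  intro l
  induction l with
  | nil => exact fun st _ => ⟨rfl, by simp⟩
  | cons i l ih =>
    intro st h
    simp only [List.foldl_cons] at h ⊢
    have h1 : (sweepB arr st i).2 = false := by
      by_contra hh
      rw [sweep_fold_snd_mono arr l (sweepB arr st i) (by simpa using hh)] at h
      exact absurd h (by simp)
    obtain ⟨he, _, hcl⟩ := sweepB_fix arr st i h1
    rw [he] at h ⊢
    obtain ⟨hfix, hrest⟩ := ih st h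
    refine ⟨hfix, ?_⟩
    intro j hj
    rcases List.mem_cons.mp hj with heq | hj'
    · subst heq; exact hcl
    · exact hrest j hj'

theorem satLoop_spec (arr : List Int) (s : Nat) :
    ∀ (fuel : Nat) (r : List Bool), StB arr s r → r.count false + 1 ≤ fuel →

      StB arr s (satLoop arr fuel r) ∧ ClosedB arr (satLoop arr fuel r) := by
  intro fuel
  induction fuel with
  | zero => intro r _ hm; omega
  | succ fuel ih =>
    intro r hst hm
    obtain ⟨hlen, hgs, hsound⟩ := hst
    have hl : ∀ i ∈ PySem.List.pyRange 0 (arr.length : Int) 1, 0 ≤ i := by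
      intro i hi
      rw [PySem.List.mem_pyRange_one] at hi
      exact hi.1
    obtain ⟨plen, pmono, psound, ple, pchg⟩ :=
      sweep_fold_spec arr s (PySem.List.pyRange 0 (arr.length : Int) 1) (r, false) hl hlen hsound
    by_cases hch : (passB arr (r, false)).2 = true
    · have hstep : satLoop arr (fuel + 1) r = satLoop arr fuel (passB arr (r, false)).1 := by
        simp [satLoop, hch]
      rw [hstep]
      have hlt : (passB arr (r, false)).1.count false < r.count false := by
        rcases pchg hch with h | h
        · simp at h
        · exact h
      exact ih (passB arr (r, false)).1 ⟨plen, pmono _ hgs, psound⟩ (by omega)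
    · have hstep : satLoop arr (fuel + 1) r = (passB arr (r, false)).1 := by
        simp [satLoop, hch]
      obtain ⟨hfix, hcl⟩ := sweep_fold_fix arr (PySem.List.pyRange 0 (arr.length : Int) 1)
        (r, false) (by simpa using hch)
      have hr1 : (passB arr (r, false)).1 = r := by
        have : passB arr (r, false) = (r, false) := hfix
        rw [this]
      rw [hstep, hr1]
      refine ⟨⟨hlen, hgs, hsound⟩, ?_⟩
      intro k hk c hc h0 h1
      have hklt : k < arr.length := hlen ▸ getD_true_lt _ _ hk
      have hmem : (↑k : Int) ∈ PySem.List.pyRange 0 (arr.length : Int) 1 := by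
        rw [PySem.List.mem_pyRange_one]
        exact ⟨Int.natCast_nonneg _, by exact_mod_cast hklt⟩
      have := hcl (↑k) hmem (Int.natCast_nonneg _) (by simpa using hk)
      simp only [Int.toNat_natCast] at this
      exact this c hc h0 h1

theorem reach_subset (arr : List Int) (s : Nat) (r : List Bool)
    (hst : StB arr s r) (hcl : ClosedB arr r) :
    ∀ k : Nat, Reach arr s k → r.getD k false = true := by
  intro k hk
  induction hk with
  | refl h => exact hst.2.1
  | step hr heq hlt ih =>
    have := hcl _ ih _ heq (Int.natCast_nonneg _) (by exact_mod_cast hlt)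
    simpa using this

-- ---- the two characterizations ----


-- facts about the freshly initialised visited/reach array
theorem init_facts (arr : List Int) (start : Int) (h0 : 0 ≤ start)
    (h1 : start < (arr.length : Int)) :
    PySem.List.pySetD (List.replicate arr.length false) start true
      = (List.replicate arr.length false).set start.toNat true ∧
    ((List.replicate arr.length false).set start.toNat true).length = arr.length ∧
    (∀ k : Nat, ((List.replicate arr.length false).set start.toNat true).getD k false = true
       ↔ k = start.toNat) ∧
    ((List.replicate arr.length false).set start.toNat true).count false + 1 = arr.length := by
  have hrep : ∀ k : Nat, (List.replicate arr.length false).getD k false = false := by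
    intro k
    rw [List.getD_eq_getElem?_getD, List.getElem?_replicate]
    split_ifs <;> rfl
  have hslt : start.toNat < (List.replicate arr.length false).length := by simp; omega
  refine ⟨PySem.List.pySetD_of_nonneg _ true h0, by simp, ?_, ?_⟩
  · intro k
    constructor
    · intro hk
      rw [getD_set_bool] at hk
      by_cases h : k = start.toNat ∧ start.toNat < (List.replicate arr.length false).length
      · exact h.1
      · rw [if_neg h, hrep k] at hk
        simp at hk
    · rintro rfl
      rw [getD_set_bool, if_pos ⟨rfl, hslt⟩]
  · rw [count_false_set _ _ hslt (hrep _)]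
    simp

theorem bfs_iff (arr : List Int) (start : Int) (h0 : 0 ≤ start) (h1 : start < (arr.length : Int)) :
    (bfs_approach_py arr start = true ↔
      ∃ k, Reach arr start.toNat k ∧ arr.getD k 0 = 0) := by
  obtain ⟨hset, hlen, hgd, hcnt⟩ := init_facts arr start h0 h1
  have hs : start.toNat < arr.length := by omega
  have hstart : ((start.toNat : Nat) : Int) = start := Int.toNat_of_nonneg h0
  show bfsLoop arr (arr.length + 1)
      (PySem.List.pySetD (List.replicate arr.length false) start true) [start] = true ↔ _
  rw [hset]
  apply bfsLoop_iff arr start.toNat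
  · refine ⟨hlen, (hgd _).mpr rfl, ?_, ?_⟩
    · intro i hi
      rcases List.mem_cons.mp hi with rfl | h
      · exact ⟨h0, h1, (hgd _).mpr rfl⟩
      · simp at h
    · intro k hk
      rw [(hgd k).mp hk]
      exact Reach.refl hs
  · intro k hk hnotin
    exfalso
    apply hnotin
    rw [(hgd k).mp hk, hstart]
    exact List.mem_cons_self ..
  · simp only [List.length_cons, List.length_nil]
    omega

theorem alt_iff (arr : List Int) (start : Int) (h0 : 0 ≤ start) (h1 : start < (arr.length : Int)) :
    (bfs_approach_py_alt arr start = true ↔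
      ∃ k, Reach arr start.toNat k ∧ arr.getD k 0 = 0) := by
  obtain ⟨hset, hlen, hgd, hcnt⟩ := init_facts arr start h0 h1
  have hs : start.toNat < arr.length := by omega
  show (PySem.List.pyRange 0 (arr.length : Int) 1).any
      (fun i => PySem.List.pyGetD (satLoop arr (arr.length + 1)
          (PySem.List.pySetD (List.replicate arr.length false) start true)) i false
        && (PySem.List.pyGetD arr i 0 == 0)) = true ↔ _
  rw [hset]
  obtain ⟨hstB, hclB⟩ := satLoop_spec arr start.toNat (arr.length + 1)
    ((List.replicate arr.length false).set start.toNat true)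
    ⟨hlen, (hgd _).mpr rfl, fun k hk => by rw [(hgd k).mp hk]; exact Reach.refl hs⟩ (by omega)
  set r := satLoop arr (arr.length + 1)
    ((List.replicate arr.length false).set start.toNat true) with hr
  rw [List.any_eq_true]
  constructor
  · rintro ⟨i, hmem, hf⟩
    rw [PySem.List.mem_pyRange_one] at hmem
    obtain ⟨hi0, hi1⟩ := hmem
    rw [Bool.and_eq_true] at hf
    obtain ⟨hrt, hz⟩ := hf
    rw [pyGetD_toNat _ _ hi0] at hrt
    rw [pyGetD_toNat _ _ hi0, beq_iff_eq] at hz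
    exact ⟨i.toNat, hstB.2.2 _ hrt, hz⟩
  · rintro ⟨k, hk, hz⟩
    have hklt := reach_lt hk
    refine ⟨(k : Int), ?_, ?_⟩
    · rw [PySem.List.mem_pyRange_one]
      exact ⟨Int.natCast_nonneg _, by exact_mod_cast hklt⟩
    · rw [Bool.and_eq_true]
      constructor
      · rw [pyGetD_toNat _ _ (Int.natCast_nonneg _), Int.toNat_natCast]
        exact reach_subset arr start.toNat r hstB hclB k hk
      · rw [pyGetD_toNat _ _ (Int.natCast_nonneg _), Int.toNat_natCast, beq_iff_eq]
        exact hz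

-- ===== VERDICT (by name: the statement is the Claim_ definition above) =====
theorem bfs_approach_py_spec : Claim_equal_bfs_approach_py := by
  intro arr start _ hpre
  obtain ⟨h0, h1⟩ := hpre
  exact Bool.coe_iff_coe.mp ((bfs_iff arr start h0 h1).trans (alt_iff arr start h0 h1).symm)
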